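-- pv_equiv track=rewrite | github.com/Bvega/PAIOS-V1 | api_server.py | group_lines
-- ===== SOURCE A (Python) =====
-- def classify_line(line):
--     """
--     Classify one summary line into a rule-based semantic category.
--     """
--     lower_line = line.lower()
--
--     if "terminate" in lower_line or "termination" in lower_line:
--         return "Termination"
--
--     if "liability" in lower_line or "damages" in lower_line:
--         return "Liability"
--
--     if "payment" in lower_line:
--         return "Payment"
--
--     return "General"
--
-- def group_lines(lines):
--     """
--     Group clean summary lines into semantic categories.
--     """
--     groups = {
--         "Termination": [],
--         "Liability": [],
--         "Payment": [],
--         "General": [],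
--     }
--
--     for line in lines:
--         category = classify_line(line)
--         groups[category].append(line)
--
--     return groups
-- ===== SOURCE B (Python) =====
-- _RULES = [
--     ("Termination", ("terminate", "termination")),
--     ("Liability", ("liability", "damages")),
--     ("Payment", ("payment",)),
-- ]
--
-- def group_lines(lines):
--     """
--     Group clean summary lines into semantic categories by
--     category-wise partitioning passes over a shrinking pool.
--     """
--     result = {}
--     pool = list(lines)
--     for category, keywords in _RULES:
--         result[category] = [l for l in pool if any(k in l.lower() for k in keywords)]
--         pool = [l for l in pool if not any(k in l.lower() for k in keywords)]
--     result["General"] = pool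
--     return result
-- ===== Notes on version B (the rewrite author's own statement) =====
-- stated objective: alternative
-- what changed: Replaced the single pass that classifies each line and appends it to its dict bucket with category-wise partitioning passes: for each category in priority order B filters the matching lines out of a shrinking pool of unassigned lines, and the leftover pool becomes 'General'.
import Mathlib
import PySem

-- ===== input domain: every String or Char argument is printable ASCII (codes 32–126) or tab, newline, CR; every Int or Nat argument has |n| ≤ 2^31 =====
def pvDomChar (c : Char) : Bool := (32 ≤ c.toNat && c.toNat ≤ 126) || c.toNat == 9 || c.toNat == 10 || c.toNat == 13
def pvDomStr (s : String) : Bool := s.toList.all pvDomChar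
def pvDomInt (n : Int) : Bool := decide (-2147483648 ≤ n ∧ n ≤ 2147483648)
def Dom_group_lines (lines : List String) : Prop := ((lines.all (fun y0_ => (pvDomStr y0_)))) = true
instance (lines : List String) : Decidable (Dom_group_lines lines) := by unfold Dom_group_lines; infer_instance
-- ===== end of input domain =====

-- B replaces A's one-line-at-a-time classify-and-append pass with category-wise
-- partitioning passes over a shrinking pool (alternative decomposition, same cost).


-- ===== PORT A =====
def classify_line (line : String) : String :=
  let lower_line := PySem.Str.lower line
  if PySem.Str.isIn "terminate" lower_line || PySem.Str.isIn "termination" lower_line then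
    "Termination"
  else if PySem.Str.isIn "liability" lower_line || PySem.Str.isIn "damages" lower_line then
    "Liability"
  else if PySem.Str.isIn "payment" lower_line then
    "Payment"
  else
    "General"

def group_lines (lines : List String) : List (String × List String) :=
  let groups : PySem.Dict String (List String) :=
    PySem.Dict.ofList [("Termination", []), ("Liability", []), ("Payment", []), ("General", [])]
  (lines.foldl (fun g line => g.modify (classify_line line) [] (fun xs => xs ++ [line])) groups).items

-- ===== PORT B =====
def pvMatches (keywords : List String) (l : String) : Bool :=
  keywords.any (fun k => PySem.Str.isIn k (PySem.Str.lower l))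

def pvRules : List (String × List String) :=
  [("Termination", ["terminate", "termination"]),
   ("Liability", ["liability", "damages"]),
   ("Payment", ["payment"])]

def group_lines_alt (lines : List String) : List (String × List String) :=
  let fin := pvRules.foldl
    (fun (acc : List (String × List String) × List String) rule =>
      (acc.1 ++ [(rule.1, acc.2.filter (pvMatches rule.2))],
       acc.2.filter (fun l => !pvMatches rule.2 l)))
    ([], lines)
  fin.1 ++ [("General", fin.2)]

-- ===== PRECONDITION & SPEC =====
def Spec_group_lines (lines : List String) (out : List (String × List String)) : Prop := out = group_lines_alt lines
instance (lines : List String) (out : List (String × List String)) : Decidable (Spec_group_lines lines out) := by unfold Spec_group_lines; infer_instance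

-- ===== CLAIM (what is proved, stated in full; the proofs are below) =====
def Claim_equal_group_lines : Prop := ∀ (lines : List String), Dom_group_lines lines → Spec_group_lines lines (group_lines lines)

-- ===== LEMMAS AND PROOFS =====

-- the three priority predicates, on the lowered line
def bT (l : String) : Bool :=
  PySem.Str.isIn "terminate" (PySem.Str.lower l) || PySem.Str.isIn "termination" (PySem.Str.lower l)
def bL (l : String) : Bool :=
  PySem.Str.isIn "liability" (PySem.Str.lower l) || PySem.Str.isIn "damages" (PySem.Str.lower l)
def bP (l : String) : Bool :=
  PySem.Str.isIn "payment" (PySem.Str.lower l)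

-- A's accumulating fold over an arbitrary 4-bucket state
lemma groupA_inv (lines : List String) : ∀ (t l p g : List String),
    (lines.foldl (fun d line => d.modify (classify_line line) [] (fun xs => xs ++ [line]))
      (PySem.Dict.ofList [("Termination", t), ("Liability", l), ("Payment", p), ("General", g)])).items
    = [("Termination", t ++ lines.filter (fun x => bT x)),
       ("Liability", l ++ lines.filter (fun x => !bT x && bL x)),
       ("Payment", p ++ lines.filter (fun x => !bT x && !bL x && bP x)),
       ("General", g ++ lines.filter (fun x => !bT x && !bL x && !bP x))] := by
  induction lines with
  | nil =>
    intro t l p g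
    simp [PySem.Dict.ofList, PySem.Dict.update, PySem.Dict.insert, PySem.Dict.empty,
      PySem.Dict.contains]
  | cons x xs ih =>
    intro t l p g
    simp only [List.foldl_cons, List.filter_cons]
    by_cases hT : bT x = true
    · have hc : classify_line x = "Termination" := by
        simp [classify_line, bT] at hT ⊢
        rcases hT with h | h <;> simp [h]
      have : (PySem.Dict.ofList [("Termination", t), ("Liability", l), ("Payment", p),
          ("General", g)]).modify (classify_line x) [] (fun xs => xs ++ [x])
          = PySem.Dict.ofList [("Termination", t ++ [x]), ("Liability", l), ("Payment", p),
          ("General", g)] := by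
        rw [hc]; rfl
      rw [this, ih]
      simp [hT]
    · by_cases hL : bL x = true
      · have hc : classify_line x = "Liability" := by
          simp [classify_line, bT] at hT ⊢
          simp [bL] at hL
          rcases hL with h | h <;> simp [hT.1, hT.2, h]
        have : (PySem.Dict.ofList [("Termination", t), ("Liability", l), ("Payment", p),
            ("General", g)]).modify (classify_line x) [] (fun xs => xs ++ [x])
            = PySem.Dict.ofList [("Termination", t), ("Liability", l ++ [x]), ("Payment", p),
            ("General", g)] := by
          rw [hc]; rfl
        rw [this, ih]
        simp [hT, hL]
      · by_cases hP : bP x = true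
        · have hc : classify_line x = "Payment" := by
            simp [classify_line, bT] at hT ⊢
            simp [bL] at hL
            simp [bP] at hP
            simp [hT.1, hT.2, hL.1, hL.2, hP]
          have : (PySem.Dict.ofList [("Termination", t), ("Liability", l), ("Payment", p),
              ("General", g)]).modify (classify_line x) [] (fun xs => xs ++ [x])
              = PySem.Dict.ofList [("Termination", t), ("Liability", l), ("Payment", p ++ [x]),
              ("General", g)] := by
            rw [hc]; rfl
          rw [this, ih]
          simp [hT, hL, hP]
        · have hc : classify_line x = "General" := by
            simp [classify_line, bT] at hT ⊢
            simp [bL] at hL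
            simp [bP] at hP
            simp [hT.1, hT.2, hL.1, hL.2, hP]
          have : (PySem.Dict.ofList [("Termination", t), ("Liability", l), ("Payment", p),
              ("General", g)]).modify (classify_line x) [] (fun xs => xs ++ [x])
              = PySem.Dict.ofList [("Termination", t), ("Liability", l), ("Payment", p),
              ("General", g ++ [x])] := by
            rw [hc]; rfl
          rw [this, ih]
          simp [hT, hL, hP]

-- B's nested pool filters, collapsed to single filters over the input
lemma groupB_eq (lines : List String) :
    group_lines_alt lines
    = [("Termination", lines.filter (fun x => bT x)),
       ("Liability", lines.filter (fun x => !bT x && bL x)),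
       ("Payment", lines.filter (fun x => !bT x && !bL x && bP x)),
       ("General", lines.filter (fun x => !bT x && !bL x && !bP x))] := by
  have e1 : pvMatches ["terminate", "termination"] = fun x => bT x :=
    funext fun x => by simp [pvMatches, bT]
  have e2 : pvMatches ["liability", "damages"] = fun x => bL x :=
    funext fun x => by simp [pvMatches, bL]
  have e3 : pvMatches ["payment"] = fun x => bP x :=
    funext fun x => by simp [pvMatches, bP]
  simp only [group_lines_alt, pvRules, List.foldl_cons, List.foldl_nil, e1, e2, e3,
    List.filter_filter, List.nil_append, List.cons_append]
  simp only [Bool.and_assoc]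
  have g2 : (fun a => bL a && !bT a) = (fun x : String => !bT x && bL x) :=
    funext fun x => by cases bT x <;> cases bL x <;> rfl
  have g3 : (fun a => bP a && (!bL a && !bT a)) = (fun x : String => !bT x && (!bL x && bP x)) :=
    funext fun x => by cases bT x <;> cases bL x <;> cases bP x <;> rfl
  have g4 : (fun a => !bP a && (!bL a && !bT a)) = (fun x : String => !bT x && (!bL x && !bP x)) :=
    funext fun x => by cases bT x <;> cases bL x <;> cases bP x <;> rfl
  rw [g2, g3, g4]

-- ===== VERDICT (by name: the statement is the Claim_ definition above) =====
theorem group_lines_spec : Claim_equal_group_lines := by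
  intro lines _
  show group_lines lines = group_lines_alt lines
  rw [group_lines, groupB_eq]
  simpa using groupA_inv lines [] [] [] []
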